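-- pv_equiv track=rewrite | github.com/pChitral/eas503_mini_project1 | mini_project1.py | create_dictionary_of_info_field_values
-- ===== SOURCE A (Python) =====
-- def create_dictionary_of_info_field_values(data):
--     # BEGIN SOLUTION
--     dicto = {}
--     info_maal = (data)
--     ith_info_maal = []
--
--     for i in range(len(info_maal)):
--         ith_info_maal = (info_maal[i].split(";"))
--         for j in range(len(ith_info_maal)):
--             try:
--                 key, value = ith_info_maal[j].split("=", 1)
--                 if value != ".":
--                     if key not in dicto.keys():
--                         dicto[key] = [value]
--                     else:
--                         if value not in dicto[key]:
--                             dicto[key] += [value]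
--             except:
--                 continue
--     return dicto
-- ===== SOURCE B (Python) =====
-- def create_dictionary_of_info_field_values(data):
--     # Flatten to a list of (key, value) pairs first, then group by key:
--     # unique keys in first-seen order, each mapped to its unique-in-order values.
--     pairs = []
--     for line in data:
--         for part in line.split(";"):
--             try:
--                 key, value = part.split("=", 1)
--             except ValueError:
--                 continue
--             if value != ".":
--                 pairs.append((key, value))
--     keys = list(dict.fromkeys(k for k, _ in pairs))
--     return {k: list(dict.fromkeys(v for k2, v in pairs if k2 == k)) for k in keys}
-- ===== Notes on version B (the rewrite author's own statement) =====
-- stated objective: alternative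
-- what changed: B flattens the input into a flat list of (key,value) pairs in one pass and then computes the result as a group-by over that list (unique keys in first-seen order, each key mapped to the ordered dedup of its filtered values), instead of A's incremental dict of unique lists with membership checks on every insert.
import Mathlib
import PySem

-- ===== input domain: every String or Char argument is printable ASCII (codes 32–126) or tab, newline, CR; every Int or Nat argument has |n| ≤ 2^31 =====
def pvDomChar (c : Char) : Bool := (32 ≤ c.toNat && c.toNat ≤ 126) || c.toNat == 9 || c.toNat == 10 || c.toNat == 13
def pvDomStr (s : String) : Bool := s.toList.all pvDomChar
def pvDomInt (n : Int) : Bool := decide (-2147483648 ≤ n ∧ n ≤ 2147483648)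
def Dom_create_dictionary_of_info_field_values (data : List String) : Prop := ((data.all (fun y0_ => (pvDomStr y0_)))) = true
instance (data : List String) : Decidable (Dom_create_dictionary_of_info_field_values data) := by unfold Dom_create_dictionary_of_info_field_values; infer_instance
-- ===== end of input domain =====

-- B flattens the input to a flat list of (key,value) pairs and computes the result as a
-- group-by over that list, instead of A's incremental dict of unique value lists.

-- ===== PORT A =====
def pvAstep (dicto : PySem.Dict String (List String)) (part : String) : PySem.Dict String (List String) :=
  match PySem.Str.splitMax? part "=" 1 with
  | some [key, value] =>
      if value ≠ "." then
        if ¬ (key ∈ dicto.keys) then dicto.insert key [value]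
        else if ¬ (value ∈ dicto.getD key []) then dicto.insert key (dicto.getD key [] ++ [value])
        else dicto
      else dicto
  | _ => dicto  -- the unpacking failed: bare except → continue

def create_dictionary_of_info_field_values (data : List String) : List (String × List String) :=
  (data.foldl
    (fun dicto line => ((PySem.Str.split? line ";").getD []).foldl pvAstep dicto)
    PySem.Dict.empty).items

-- ===== PORT B =====
def pvCollect (pairs : List (String × String)) (part : String) : List (String × String) :=
  match PySem.Str.splitMax? part "=" 1 with
  | some [key, value] => if value ≠ "." then pairs ++ [(key, value)] else pairs
  | _ => pairs  -- no '=': ValueError → continue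

def create_dictionary_of_info_field_values_alt (data : List String) : List (String × List String) :=
  let pairs := data.foldl
    (fun pairs line => ((PySem.Str.split? line ";").getD []).foldl pvCollect pairs) []
  let keys := PySem.List.dedup (pairs.map Prod.fst)
  keys.map (fun k => (k, PySem.List.dedup ((pairs.filter (fun p => p.1 == k)).map Prod.snd)))

-- ===== PRECONDITION & SPEC =====
def Spec_create_dictionary_of_info_field_values (data : List String) (out : List (String × List String)) : Prop := out = create_dictionary_of_info_field_values_alt data
instance (data : List String) (out : List (String × List String)) : Decidable (Spec_create_dictionary_of_info_field_values data out) := by unfold Spec_create_dictionary_of_info_field_values; infer_instance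

-- ===== CLAIM (what is proved, stated in full; the proofs are below) =====
def Claim_equal_create_dictionary_of_info_field_values : Prop := ∀ (data : List String), Dom_create_dictionary_of_info_field_values data → Spec_create_dictionary_of_info_field_values data (create_dictionary_of_info_field_values data)

-- ===== LEMMAS AND PROOFS =====

-- A's update step given an already-extracted (key, value) pair with value ≠ ".".
def pvStep2 (d : PySem.Dict String (List String)) (p : String × String) : PySem.Dict String (List String) :=
  if ¬ (p.1 ∈ d.keys) then d.insert p.1 [p.2]
  else if ¬ (p.2 ∈ d.getD p.1 []) then d.insert p.1 (d.getD p.1 [] ++ [p.2])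
  else d

-- the group-by that B's final comprehension computes
def pvGroup (pairs : List (String × String)) : List (String × List String) :=
  (PySem.List.dedup (pairs.map Prod.fst)).map
    (fun k => (k, PySem.List.dedup ((pairs.filter (fun p => p.1 == k)).map Prod.snd)))

theorem pv_dedup_append_single {α : Type} [DecidableEq α] (v : List α) (x : α) :
    PySem.List.dedup (v ++ [x]) =
      if x ∈ v then PySem.List.dedup v else PySem.List.dedup v ++ [x] := by
  show PySem.Set.ofList (v ++ [x]) = _
  rw [PySem.Set.ofList_append]
  show PySem.Set.add (PySem.Set.ofList v) x = _
  by_cases hm : x ∈ v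
  · simp [PySem.Set.add, hm, PySem.List.dedup]
  · simp [PySem.Set.add, hm, PySem.List.dedup]

-- pvAstep / pvCollect, seen through A's pair step
theorem pv_astep_eq (d : PySem.Dict String (List String)) (part : String) :
    pvAstep d part =
      match PySem.Str.splitMax? part "=" 1 with
      | some [key, value] => if value ≠ "." then pvStep2 d (key, value) else d
      | _ => d := by
  unfold pvAstep pvStep2
  cases PySem.Str.splitMax? part "=" 1 with
  | none => rfl
  | some l => rcases l with _ | ⟨k, _ | ⟨v, _ | ⟨x, rest⟩⟩⟩ <;> rfl

-- commuting a parts-level collect fold with the pair fold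
theorem pv_parts_comm (parts : List String) (acc : List (String × String))
    (d : PySem.Dict String (List String)) :
    (parts.foldl pvCollect acc).foldl pvStep2 d = parts.foldl pvAstep (acc.foldl pvStep2 d) := by
  induction parts generalizing acc d with
  | nil => rfl
  | cons part ps ih =>
      simp only [List.foldl_cons]
      rw [ih]
      congr 1
      rw [pv_astep_eq]
      unfold pvCollect
      cases PySem.Str.splitMax? part "=" 1 with
      | none => rfl
      | some l =>
        rcases l with _ | ⟨k, _ | ⟨v, _ | ⟨x, rest⟩⟩⟩
        · rfl
        · rfl
        · by_cases hv : v = "." <;> simp [hv, List.foldl_append]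
        · rfl

theorem pv_lines_comm (data : List String) (acc : List (String × String))
    (d : PySem.Dict String (List String)) :
    (data.foldl (fun pairs line => ((PySem.Str.split? line ";").getD []).foldl pvCollect pairs) acc).foldl pvStep2 d
      = data.foldl (fun dicto line => ((PySem.Str.split? line ";").getD []).foldl pvAstep dicto) (acc.foldl pvStep2 d) := by
  induction data generalizing acc d with
  | nil => rfl
  | cons line rest ih =>
      simp only [List.foldl_cons]
      rw [ih, pv_parts_comm]

-- find? of an equality test returns the sought element itself
theorem pv_find?_beq {α : Type} [DecidableEq α] (l : List α) (k : α) (h : k ∈ l) :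
    l.find? (fun x => x == k) = some k := by
  induction l with
  | nil => cases h
  | cons a t ih =>
      rw [List.find?_cons]
      by_cases ha : a = k
      · simp [ha]
      · have hk : k ∈ t := by cases h with
          | head => exact absurd rfl ha
          | tail _ ht => exact ht
        have hb : (a == k) = false := beq_eq_false_iff_ne.mpr ha
        simp [hb, ih hk]

-- getD on a dict whose items are a group-by map
theorem pv_getD_group (pairs : List (String × String)) (k : String) :
    (PySem.Dict.mk (pvGroup pairs)).getD k [] =
      if k ∈ pairs.map Prod.fst then
        PySem.List.dedup ((pairs.filter (fun p => p.1 == k)).map Prod.snd)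
      else [] := by
  unfold pvGroup
  show ((((PySem.List.dedup (pairs.map Prod.fst)).map _).find? (fun p => p.1 == k)).map Prod.snd).getD [] = _
  rw [List.find?_map]
  by_cases hm : k ∈ pairs.map Prod.fst
  · have hd : k ∈ PySem.List.dedup (pairs.map Prod.fst) := (PySem.List.mem_dedup _ _).mpr hm
    rw [show ((fun p : String × List String => p.1 == k) ∘ _) = (fun x => x == k) from rfl,
      pv_find?_beq _ k hd]
    simp [hm]
  · have hd : (PySem.List.dedup (pairs.map Prod.fst)).find? (fun x => x == k) = none := by
      rw [List.find?_eq_none]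
      intro x hx hbe
      exact hm ((PySem.List.mem_dedup _ _).mp (by rwa [show x = k by simpa using hbe] at hx))
    rw [show ((fun p : String × List String => p.1 == k) ∘ _) = (fun x => x == k) from rfl, hd]
    simp [hm]

theorem pv_keys_group (pairs : List (String × String)) :
    (PySem.Dict.mk (pvGroup pairs)).keys = PySem.List.dedup (pairs.map Prod.fst) := by
  show (pvGroup pairs).map Prod.fst = _
  unfold pvGroup
  rw [List.map_map]
  exact List.map_id _

-- filters over an extended pair list
theorem pv_filter_append (pairs : List (String × String)) (k k' v : String) :
    (pairs ++ [(k, v)]).filter (fun p => p.1 == k') =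
      if k = k' then pairs.filter (fun p => p.1 == k') ++ [(k, v)]
      else pairs.filter (fun p => p.1 == k') := by
  rw [List.filter_append]
  by_cases h : k = k' <;> simp [h]

-- one pvStep2 step preserves the group-by invariant
theorem pv_step2_group (pairs : List (String × String)) (p : String × String) :
    pvStep2 (PySem.Dict.mk (pvGroup pairs)) p = PySem.Dict.mk (pvGroup (pairs ++ [p])) := by
  obtain ⟨k, v⟩ := p
  unfold pvStep2
  simp only [pv_keys_group, pv_getD_group]
  have hfk := pv_filter_append pairs k k v
  by_cases hm : k ∈ pairs.map Prod.fst
  · have hd : k ∈ PySem.List.dedup (pairs.map Prod.fst) := (PySem.List.mem_dedup _ _).mpr hm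
    simp only [hd, not_true_eq_false, if_false, hm, if_true]
    by_cases hv : v ∈ (pairs.filter (fun p => p.1 == k)).map Prod.snd
    · -- value already present: dict unchanged, and the dedup of the extended filter collapses
      have hvd : v ∈ PySem.List.dedup ((pairs.filter (fun p => p.1 == k)).map Prod.snd) :=
        (PySem.List.mem_dedup _ _).mpr hv
      simp only [hvd, not_true_eq_false, if_false]
      apply PySem.Dict.ext
      show pvGroup pairs = pvGroup (pairs ++ [(k, v)])
      unfold pvGroup
      have hkeys : PySem.List.dedup ((pairs ++ [(k, v)]).map Prod.fst)
          = PySem.List.dedup (pairs.map Prod.fst) := by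
        rw [List.map_append, List.map_cons, List.map_nil, pv_dedup_append_single, if_pos hm]
      rw [hkeys]
      refine List.map_congr_left (fun k' _ => ?_)
      rw [pv_filter_append]
      by_cases hk' : k = k'
      · subst hk'
        rw [if_pos rfl, List.map_append, List.map_cons, List.map_nil,
          pv_dedup_append_single, if_pos hv]
      · rw [if_neg hk']
    · -- new value for an existing key: insert replaces that key's entry in place
      have hvd : v ∉ PySem.List.dedup ((pairs.filter (fun p => p.1 == k)).map Prod.snd) :=
        fun h => hv ((PySem.List.mem_dedup _ _).mp h)
      simp only [hvd, not_false_eq_true, if_true]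
      apply PySem.Dict.ext
      rw [PySem.Dict.items_insert]
      have hc : (PySem.Dict.mk (pvGroup pairs)).contains k = true := by
        rw [PySem.Dict.contains_eq_decide_mem_keys, pv_keys_group]
        simpa using hd
      rw [if_pos hc]
      show (pvGroup pairs).map _ = pvGroup (pairs ++ [(k, v)])
      unfold pvGroup
      have hkeys : PySem.List.dedup ((pairs ++ [(k, v)]).map Prod.fst)
          = PySem.List.dedup (pairs.map Prod.fst) := by
        rw [List.map_append, List.map_cons, List.map_nil, pv_dedup_append_single, if_pos hm]
      rw [hkeys, List.map_map]
      refine List.map_congr_left (fun k' _ => ?_)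
      simp only [Function.comp]
      rw [pv_filter_append]
      by_cases hk' : k = k'
      · subst hk'
        rw [if_pos rfl, List.map_append, List.map_cons, List.map_nil,
          pv_dedup_append_single, if_neg hv]
        simp
      · have hne : (k' == k) = false := beq_eq_false_iff_ne.mpr (fun h => hk' h.symm)
        simp [hne, hk']
  · -- fresh key: appended at the end in both views
    have hd : k ∉ PySem.List.dedup (pairs.map Prod.fst) :=
      fun h => hm ((PySem.List.mem_dedup _ _).mp h)
    simp only [hd, not_false_eq_true, if_true]
    apply PySem.Dict.ext
    rw [PySem.Dict.items_insert]
    have hc : (PySem.Dict.mk (pvGroup pairs)).contains k = false := by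
      rw [PySem.Dict.contains_eq_decide_mem_keys, pv_keys_group]
      simpa using hd
    rw [hc, if_neg (by simp)]
    show pvGroup pairs ++ [(k, [v])] = pvGroup (pairs ++ [(k, v)])
    unfold pvGroup
    have hkeys : PySem.List.dedup ((pairs ++ [(k, v)]).map Prod.fst)
        = PySem.List.dedup (pairs.map Prod.fst) ++ [k] := by
      rw [List.map_append, List.map_cons, List.map_nil, pv_dedup_append_single, if_neg hm]
    rw [hkeys, List.map_append, List.map_cons, List.map_nil]
    congr 1
    · refine (List.map_congr_left (fun k' hk' => ?_)).symm
      rw [pv_filter_append]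
      have : k ≠ k' := fun h => hd (h ▸ hk')
      rw [if_neg this]
    · rw [pv_filter_append, if_pos rfl]
      have hnil : pairs.filter (fun p => p.1 == k) = [] := by
        rw [List.filter_eq_nil_iff]
        intro p hp hbe
        exact hm (List.mem_map.mpr ⟨p, hp, by simpa using hbe⟩)
      rw [hnil]
      rfl

-- folding A's pair step from the empty dict yields the group-by
theorem pv_fold_group (pairs : List (String × String)) :
    pairs.foldl pvStep2 PySem.Dict.empty = PySem.Dict.mk (pvGroup pairs) := by
  induction pairs using List.reverseRecOn with
  | nil => rfl
  | append_singleton ps p ih =>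
      rw [List.foldl_append, List.foldl_cons, List.foldl_nil, ih, pv_step2_group]

-- ===== VERDICT (by name: the statement is the Claim_ definition above) =====
theorem create_dictionary_of_info_field_values_spec : Claim_equal_create_dictionary_of_info_field_values := by
  intro data _
  show _ = _
  unfold create_dictionary_of_info_field_values create_dictionary_of_info_field_values_alt
  have h := pv_lines_comm data [] PySem.Dict.empty
  simp only [List.foldl_nil] at h
  rw [← h, pv_fold_group]
  rfl
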